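-- pv_equiv track=rewrite | github.com/dayutech/cfr | scan_jar_packages.py | parse_config_sections
-- ===== SOURCE A (Python) =====
-- from typing import Dict, Iterable, List, Sequence, Set, Tuple
--
-- def parse_config_sections(lines: Sequence[str]) -> Tuple[List[str], List[str], List[str]]:
--     jar_idx = None
--     class_idx = None
--     for i, line in enumerate(lines):
--         v = line.strip().lower()
--         if v == "[jar]" and jar_idx is None:
--             jar_idx = i
--         elif v == "[class]" and class_idx is None:
--             class_idx = i
--
--     if jar_idx is None or class_idx is None or class_idx <= jar_idx:
--         raise ValueError("Config must contain [jar] and [class] sections in order")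
--
--     header = [x for x in lines[:jar_idx] if x.strip()]
--
--     jar_rules: List[str] = []
--     for line in lines[jar_idx + 1 : class_idx]:
--         v = line.strip()
--         if not v or v.startswith("#"):
--             continue
--         jar_rules.append(v)
--
--     class_rules: List[str] = []
--     for line in lines[class_idx + 1 :]:
--         v = line.strip()
--         if not v or v.startswith("#"):
--             continue
--         class_rules.append(v)
--
--     return header, jar_rules, class_rules
-- ===== SOURCE B (Python) =====
-- from typing import List, Sequence, Tuple
--
--
-- def parse_config_sections(lines: Sequence[str]) -> Tuple[List[str], List[str], List[str]]:
--     header: List[str] = []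
--     jar_rules: List[str] = []
--     class_rules: List[str] = []
--     mode = "header"
--     class_before_jar = False
--     for line in lines:
--         v = line.strip().lower()
--         if mode == "header":
--             if v == "[jar]":
--                 mode = "jar"
--             elif v == "[class]":
--                 class_before_jar = True
--             elif line.strip():
--                 header.append(line)
--         elif mode == "jar":
--             if v == "[class]":
--                 mode = "class"
--             else:
--                 s = line.strip()
--                 if s and not s.startswith("#"):
--                     jar_rules.append(s)
--         else:
--             s = line.strip()
--             if s and not s.startswith("#"):
--                 class_rules.append(s)
--     if mode != "class" or class_before_jar:
--         raise ValueError("Config must contain [jar] and [class] sections in order")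
--     return header, jar_rules, class_rules
-- ===== Notes on version B (the rewrite author's own statement) =====
-- stated objective: alternative
-- what changed: A scans once with enumerate to find the first [jar]/[class] indices and then slices the list three times; B is a single-pass state machine (header/jar/class modes) that classifies each line as it is read.
import Mathlib
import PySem

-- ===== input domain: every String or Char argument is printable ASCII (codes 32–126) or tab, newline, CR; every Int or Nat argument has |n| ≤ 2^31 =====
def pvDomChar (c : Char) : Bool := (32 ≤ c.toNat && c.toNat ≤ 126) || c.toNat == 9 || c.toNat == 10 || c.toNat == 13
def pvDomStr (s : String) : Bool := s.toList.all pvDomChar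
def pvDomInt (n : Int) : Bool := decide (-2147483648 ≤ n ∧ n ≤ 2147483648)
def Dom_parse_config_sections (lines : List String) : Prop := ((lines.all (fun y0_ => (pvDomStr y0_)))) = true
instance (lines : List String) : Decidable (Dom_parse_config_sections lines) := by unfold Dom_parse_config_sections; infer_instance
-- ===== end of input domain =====

-- B replaces A's find-the-two-indices-then-slice-three-times shape by a single-pass
-- state machine over the lines (objective: alternative decomposition, same cost).

def pvNorm (s : String) : String := PySem.Str.lower (PySem.Str.strip s)

-- ===== PORT A =====
-- the enumerate loop locating the first [jar] and first [class]
def pvAScan : List (Int × String) → Option Int → Option Int → Option Int × Option Int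
  | [], ji, ci => (ji, ci)
  | (i, line) :: rest, ji, ci =>
    let v := pvNorm line
    if v == "[jar]" && ji.isNone then pvAScan rest (some i) ci
    else if v == "[class]" && ci.isNone then pvAScan rest ji (some i)
    else pvAScan rest ji ci

def parse_config_sections (lines : List String) : List String × List String × List String :=
  match pvAScan (PySem.List.enumerate lines 0) none none with
  | (some jar_idx, some class_idx) =>
    if class_idx ≤ jar_idx then ([], [], [])   -- Python raises ValueError here (outside Pre_)
    else
      let header := (PySem.List.slice lines none (some jar_idx)).filter
        (fun x => PySem.Str.strip x != "")
      let jar_rules := (PySem.List.slice lines (some (jar_idx + 1)) (some class_idx)).foldl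
        (fun acc line =>
          let v := PySem.Str.strip line
          if v == "" || PySem.Str.startswith v "#" then acc else acc ++ [v]) []
      let class_rules := (PySem.List.slice lines (some (class_idx + 1)) none).foldl
        (fun acc line =>
          let v := PySem.Str.strip line
          if v == "" || PySem.Str.startswith v "#" then acc else acc ++ [v]) []
      (header, jar_rules, class_rules)
  | _ => ([], [], [])   -- Python raises ValueError here (outside Pre_)

-- ===== PORT B =====
-- single pass: mode ∈ {"header","jar","class"}, class_before_jar flag, three accumulators
def pvBLoop : List String → String → Bool → List String → List String → List String →
    String × Bool × List String × List String × List String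
  | [], mode, cbj, h, j, c => (mode, cbj, h, j, c)
  | line :: rest, mode, cbj, h, j, c =>
    let v := pvNorm line
    if mode == "header" then
      if v == "[jar]" then pvBLoop rest "jar" cbj h j c
      else if v == "[class]" then pvBLoop rest "header" true h j c
      else if PySem.Str.strip line != "" then pvBLoop rest "header" cbj (h ++ [line]) j c
      else pvBLoop rest "header" cbj h j c
    else if mode == "jar" then
      if v == "[class]" then pvBLoop rest "class" cbj h j c
      else
        let s := PySem.Str.strip line
        if s == "" || PySem.Str.startswith s "#" then pvBLoop rest "jar" cbj h j c
        else pvBLoop rest "jar" cbj h (j ++ [s]) c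
    else
      let s := PySem.Str.strip line
      if s == "" || PySem.Str.startswith s "#" then pvBLoop rest mode cbj h j c
      else pvBLoop rest mode cbj h j (c ++ [s])

def parse_config_sections_alt (lines : List String) : List String × List String × List String :=
  match pvBLoop lines "header" false [] [] [] with
  | (mode, cbj, h, j, c) =>
    if mode != "class" || cbj then ([], [], [])   -- Python raises ValueError here (outside Pre_)
    else (h, j, c)

-- ===== PRECONDITION & SPEC =====
-- Pre_ excludes exactly the inputs on which A raises ValueError: configs with no [jar]
-- line, no [class] line, or whose first [class] line precedes the first [jar] line.
-- (B raises the same ValueError there.)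
def Pre_parse_config_sections (lines : List String) : Prop :=
  "[class]" ∈ lines.map pvNorm ∧
    (lines.map pvNorm).idxOf "[jar]" < (lines.map pvNorm).idxOf "[class]"
instance (lines : List String) : Decidable (Pre_parse_config_sections lines) := by
  unfold Pre_parse_config_sections; infer_instance

def pvWitness_parse_config_sections : List String :=
  ["lib", "[jar]", "a.jar", "# c", "[class]", "com.Foo"]

def Spec_parse_config_sections (lines : List String) (out : List String × List String × List String) : Prop := out = parse_config_sections_alt lines
instance (lines : List String) (out : List String × List String × List String) : Decidable (Spec_parse_config_sections lines out) := by unfold Spec_parse_config_sections; infer_instance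

-- ===== CLAIM (what is proved, stated in full; the proofs are below) =====
def Claim_equal_parse_config_sections : Prop := ∀ (lines : List String), Dom_parse_config_sections lines → Pre_parse_config_sections lines → Spec_parse_config_sections lines (parse_config_sections lines)

-- ===== LEMMAS AND PROOFS =====

def pvRFilt (ls : List String) : List String :=
  ls.filterMap (fun l =>
    let v := PySem.Str.strip l
    if v == "" || PySem.Str.startswith v "#" then none else some v)

def pvHFilt (ls : List String) : List String :=
  ls.filter (fun x => PySem.Str.strip x != "")

theorem pvRFilt_cons (x : String) (xs : List String) : pvRFilt (x :: xs) =
    if (PySem.Str.strip x == "" || PySem.Str.startswith (PySem.Str.strip x) "#") then pvRFilt xs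
    else PySem.Str.strip x :: pvRFilt xs := by
  simp only [pvRFilt, List.filterMap_cons]
  split <;> rename_i h
  · by_cases hc : (PySem.Str.strip x == "" || PySem.Str.startswith (PySem.Str.strip x) "#") = true
    · rw [if_pos hc]
    · rw [if_neg hc] at h; exact (Option.some_ne_none _ h).elim
  · by_cases hc : (PySem.Str.strip x == "" || PySem.Str.startswith (PySem.Str.strip x) "#") = true
    · rw [if_pos hc] at h; simp at h
    · rw [if_neg hc] at h
      rw [if_neg hc]
      rw [Option.some_inj.mp h]

theorem rule_foldl (ls : List String) (acc : List String) :
    ls.foldl (fun acc line =>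
      let v := PySem.Str.strip line
      if v == "" || PySem.Str.startswith v "#" then acc else acc ++ [v]) acc
    = acc ++ pvRFilt ls := by
  induction ls generalizing acc with
  | nil => simp [pvRFilt]
  | cons x xs ih =>
    rw [List.foldl_cons, ih, pvRFilt_cons]
    by_cases hc : (PySem.Str.strip x == "" || PySem.Str.startswith (PySem.Str.strip x) "#") = true
    · rw [if_pos hc, if_pos hc]
    · rw [if_neg hc, if_neg hc, List.append_assoc]; rfl

theorem ascan_done (ls : List (Int × String)) (j c : Int) :
    pvAScan ls (some j) (some c) = (some j, some c) := by
  induction ls with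
  | nil => rfl
  | cons p rest ih => cases p with | mk i line => simp [pvAScan, ih]

theorem ascan_skip0 (p : List String) (rest : List (Int × String)) (k : Int)
    (hp : ∀ s ∈ p, pvNorm s ≠ "[jar]" ∧ pvNorm s ≠ "[class]") :
    pvAScan (PySem.List.enumerate p k ++ rest) none none = pvAScan rest none none := by
  induction p generalizing k with
  | nil => simp [PySem.List.enumerate_nil]
  | cons x xs ih =>
    have hx := hp x (by simp)
    rw [PySem.List.enumerate_cons]
    simp only [List.cons_append, pvAScan]
    simp [hx.1, hx.2, ih (k + 1) (fun s hs => hp s (List.mem_cons_of_mem x hs))]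

theorem ascan_skip1 (m : List String) (rest : List (Int × String)) (k j : Int)
    (hm : ∀ s ∈ m, pvNorm s ≠ "[class]") :
    pvAScan (PySem.List.enumerate m k ++ rest) (some j) none = pvAScan rest (some j) none := by
  induction m generalizing k with
  | nil => simp [PySem.List.enumerate_nil]
  | cons x xs ih =>
    have hx := hm x (by simp)
    rw [PySem.List.enumerate_cons]
    simp only [List.cons_append, pvAScan]
    simp [hx, ih (k + 1) (fun s hs => hm s (List.mem_cons_of_mem x hs))]

theorem ascan_step_jar (i : Int) (line : String) (rest : List (Int × String))
    (h : pvNorm line = "[jar]") :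
    pvAScan ((i, line) :: rest) none none = pvAScan rest (some i) none := by
  simp [pvAScan, h]

theorem ascan_step_class (i j : Int) (line : String) (rest : List (Int × String))
    (h : pvNorm line = "[class]") :
    pvAScan ((i, line) :: rest) (some j) none = pvAScan rest (some j) (some i) := by
  simp [pvAScan, h]

theorem ascan_main (p m q : List String) (jl cl : String)
    (hp : ∀ s ∈ p, pvNorm s ≠ "[jar]" ∧ pvNorm s ≠ "[class]")
    (hj : pvNorm jl = "[jar]")
    (hm : ∀ s ∈ m, pvNorm s ≠ "[class]") (hc : pvNorm cl = "[class]") :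
    pvAScan (PySem.List.enumerate (p ++ (jl :: (m ++ (cl :: q)))) 0) none none
      = (some (p.length : Int), some ((p.length : Int) + 1 + (m.length : Int))) := by
  rw [PySem.List.enumerate_append, PySem.List.enumerate_cons]
  rw [PySem.List.enumerate_append, PySem.List.enumerate_cons]
  rw [ascan_skip0 p _ 0 hp, ascan_step_jar _ _ _ hj, ascan_skip1 m _ _ _ hm,
    ascan_step_class _ _ _ _ hc, ascan_done]
  norm_num

theorem bloop_class (q : List String) (cbj : Bool) (h j c : List String) :
    pvBLoop q "class" cbj h j c = ("class", cbj, h, j, c ++ pvRFilt q) := by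
  induction q generalizing c with
  | nil => simp [pvBLoop, pvRFilt]
  | cons x xs ih =>
    simp only [pvBLoop]
    rw [if_neg (by decide), if_neg (by decide)]
    by_cases hc : (PySem.Str.strip x == "" || PySem.Str.startswith (PySem.Str.strip x) "#") = true
    · rw [if_pos hc, ih, pvRFilt_cons, if_pos hc]
    · rw [if_neg hc, ih, pvRFilt_cons, if_neg hc, List.append_assoc]; rfl

theorem bloop_jar (m rest : List String) (cbj : Bool) (h j c : List String)
    (hm : ∀ s ∈ m, pvNorm s ≠ "[class]") :
    pvBLoop (m ++ rest) "jar" cbj h j c = pvBLoop rest "jar" cbj h (j ++ pvRFilt m) c := by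
  induction m generalizing j with
  | nil => simp [pvRFilt]
  | cons x xs ih =>
    have hx := hm x (by simp)
    have ih' := fun j => ih j (fun s hs => hm s (List.mem_cons_of_mem x hs))
    simp only [List.cons_append, pvBLoop]
    rw [if_neg (by decide), if_pos (by decide), if_neg (by simp [hx])]
    by_cases hc : (PySem.Str.strip x == "" || PySem.Str.startswith (PySem.Str.strip x) "#") = true
    · rw [if_pos hc, ih' j, pvRFilt_cons, if_pos hc]
    · rw [if_neg hc, ih' (j ++ [PySem.Str.strip x]), pvRFilt_cons, if_neg hc, List.append_assoc]; rfl

theorem bloop_header (p rest : List String) (cbj : Bool) (h j c : List String)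
    (hp : ∀ s ∈ p, pvNorm s ≠ "[jar]" ∧ pvNorm s ≠ "[class]") :
    pvBLoop (p ++ rest) "header" cbj h j c = pvBLoop rest "header" cbj (h ++ pvHFilt p) j c := by
  induction p generalizing h with
  | nil => simp [pvHFilt]
  | cons x xs ih =>
    have hx := hp x (by simp)
    have ih' := fun h => ih h (fun s hs => hp s (List.mem_cons_of_mem x hs))
    simp only [List.cons_append, pvBLoop]
    rw [if_pos (by decide), if_neg (by simp [hx.1]), if_neg (by simp [hx.2])]
    by_cases hc : (PySem.Str.strip x != "") = true
    · rw [if_pos hc, ih' (h ++ [x])]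
      have : pvHFilt (x :: xs) = x :: pvHFilt xs := by
        simp only [pvHFilt, List.filter_cons]; rw [if_pos hc]
      rw [this, List.append_assoc]; rfl
    · rw [if_neg hc, ih' h]
      have : pvHFilt (x :: xs) = pvHFilt xs := by
        simp only [pvHFilt, List.filter_cons]; rw [if_neg hc]
      rw [this]

theorem bstep_jar (jl : String) (rest : List String) (cbj : Bool) (h j c : List String)
    (hj : pvNorm jl = "[jar]") :
    pvBLoop (jl :: rest) "header" cbj h j c = pvBLoop rest "jar" cbj h j c := by
  simp only [pvBLoop]
  rw [if_pos (by decide), if_pos (by simp [hj])]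

theorem bstep_class (cl : String) (rest : List String) (cbj : Bool) (h j c : List String)
    (hc : pvNorm cl = "[class]") :
    pvBLoop (cl :: rest) "jar" cbj h j c = pvBLoop rest "class" cbj h j c := by
  simp only [pvBLoop]
  rw [if_neg (by decide), if_pos (by decide), if_pos (by simp [hc])]

theorem ne_of_lt_idxOf {a : String} : ∀ (l : List String) (i : Nat) (hi : i < l.length),
    i < List.idxOf a l → l[i] ≠ a
  | x :: xs, 0, _, hlt => by
    intro he
    simp only [List.getElem_cons_zero] at he
    subst he
    simp [List.idxOf_cons_self] at hlt
  | x :: xs, i + 1, hi, hlt => by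
    by_cases hxa : x = a
    · rw [List.idxOf_cons_eq xs hxa] at hlt; omega
    · rw [List.idxOf_cons_ne xs hxa] at hlt
      simpa using ne_of_lt_idxOf xs i (by simpa using hi) (by omega)

theorem parse_decomp (lines : List String) (hpre : Pre_parse_config_sections lines) :
    ∃ p m q jl cl, lines = p ++ (jl :: (m ++ (cl :: q))) ∧
      (∀ s ∈ p, pvNorm s ≠ "[jar]" ∧ pvNorm s ≠ "[class]") ∧ pvNorm jl = "[jar]" ∧
      (∀ s ∈ m, pvNorm s ≠ "[class]") ∧ pvNorm cl = "[class]" := by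
  obtain ⟨hmem, hlt⟩ := hpre
  set ns := lines.map pvNorm with hns
  have hlen : ns.length = lines.length := by simp [hns]
  have hclen : List.idxOf "[class]" ns < lines.length := by
    rw [← hlen]; exact List.idxOf_lt_length_of_mem hmem
  set j := List.idxOf "[jar]" ns with hjdef
  set c := List.idxOf "[class]" ns with hcdef
  have hjc : j < c := hlt
  have hjlen : j < lines.length := by omega
  refine ⟨lines.take j, (lines.drop (j + 1)).take (c - j - 1), lines.drop (c + 1),
    lines[j]'hjlen, lines[c]'hclen, ?_, ?_, ?_, ?_, ?_⟩
  · have h1 : lines = lines.take j ++ lines.drop j := (List.take_append_drop j lines).symm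
    have h2 : lines.drop j = lines[j]'hjlen :: lines.drop (j + 1) :=
      List.drop_eq_getElem_cons hjlen
    have h3 : lines.drop (j + 1)
        = (lines.drop (j + 1)).take (c - j - 1) ++ (lines.drop (j + 1)).drop (c - j - 1) :=
      (List.take_append_drop _ _).symm
    have h4 : (lines.drop (j + 1)).drop (c - j - 1) = lines.drop c := by
      rw [List.drop_drop]; congr 1; omega
    have h5 : lines.drop c = lines[c]'hclen :: lines.drop (c + 1) :=
      List.drop_eq_getElem_cons hclen
    conv_lhs => rw [h1, h2, h3, h4, h5]
  · intro s hs
    rw [List.mem_iff_getElem] at hs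
    obtain ⟨i, hilen, hieq⟩ := hs
    have hij : i < j := by
      have := hilen; simp [List.length_take] at this; omega
    have hsi : s = lines[i]'(by omega) := by
      rw [← hieq]; exact List.getElem_take
    have hins : pvNorm (lines[i]'(by omega)) = ns[i]'(by omega) := by simp [hns]
    rw [hsi, hins]
    exact ⟨ne_of_lt_idxOf ns i (by omega) (by omega),
      ne_of_lt_idxOf ns i (by omega) (by omega)⟩
  · have h1 : ns[j]'(by omega) = "[jar]" := List.getElem_idxOf (by omega)
    have h2 : pvNorm (lines[j]'hjlen) = ns[j]'(by omega) := by simp [hns]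
    rw [h2, h1]
  · intro s hs
    rw [List.mem_iff_getElem] at hs
    obtain ⟨i, hilen, hieq⟩ := hs
    have hbound : i < c - j - 1 := by
      have := hilen
      simp [List.length_take, List.length_drop] at this
      omega
    have hsi : s = lines[j + 1 + i]'(by omega) := by
      rw [← hieq]
      rw [List.getElem_take, List.getElem_drop]
    have hins : pvNorm (lines[j + 1 + i]'(by omega)) = ns[j + 1 + i]'(by omega) := by
      simp [hns]
    rw [hsi, hins]
    exact ne_of_lt_idxOf ns (j + 1 + i) (by omega) (by omega)
  · have h1 : ns[c]'(by omega) = "[class]" := List.getElem_idxOf (by omega)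
    have h2 : pvNorm (lines[c]'hclen) = ns[c]'(by omega) := by simp [hns]
    rw [h2, h1]

theorem main_decomp (p m q : List String) (jl cl : String)
    (hp : ∀ s ∈ p, pvNorm s ≠ "[jar]" ∧ pvNorm s ≠ "[class]")
    (hj : pvNorm jl = "[jar]")
    (hm : ∀ s ∈ m, pvNorm s ≠ "[class]")
    (hc : pvNorm cl = "[class]") :
    parse_config_sections (p ++ (jl :: (m ++ (cl :: q))))
      = parse_config_sections_alt (p ++ (jl :: (m ++ (cl :: q)))) := by
  have hshape1 : p ++ (jl :: (m ++ (cl :: q))) = (p ++ [jl]) ++ (m ++ (cl :: q)) := by simp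
  have hshape2 : p ++ (jl :: (m ++ (cl :: q))) = ((p ++ [jl]) ++ (m ++ [cl])) ++ q := by simp
  have hd1 : (p ++ (jl :: (m ++ (cl :: q)))).drop (p.length + 1) = m ++ (cl :: q) := by
    rw [hshape1, show p.length + 1 = (p ++ [jl]).length by simp, List.drop_left]
  have hd2 : (p ++ (jl :: (m ++ (cl :: q)))).drop (p.length + 1 + m.length + 1) = q := by
    rw [hshape2, show p.length + 1 + m.length + 1 = ((p ++ [jl]) ++ (m ++ [cl])).length by
      simp; omega, List.drop_left]
  have ht1 : (p ++ (jl :: (m ++ (cl :: q)))).take p.length = p := List.take_left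
  have ht2 : (m ++ (cl :: q)).take m.length = m := List.take_left
  have hA : parse_config_sections (p ++ (jl :: (m ++ (cl :: q))))
      = (pvHFilt p, pvRFilt m, pvRFilt q) := by
    simp only [parse_config_sections, ascan_main p m q jl cl hp hj hm hc]
    rw [if_neg (by omega)]
    rw [show ((p.length : Int) + 1 + (m.length : Int)) = ((p.length + 1 + m.length : Nat) : Int)
      by push_cast; ring]
    rw [show ((p.length : Int) + 1) = ((p.length + 1 : Nat) : Int) by push_cast; ring]
    rw [show (((p.length + 1 + m.length : Nat) : Int) + 1)
      = ((p.length + 1 + m.length + 1 : Nat) : Int) by push_cast; ring]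
    rw [PySem.List.slice_to_natCast, PySem.List.slice_natCast, PySem.List.slice_from_natCast]
    rw [ht1, show p.length + 1 + m.length - (p.length + 1) = m.length by omega, hd1, ht2, hd2]
    rw [rule_foldl, rule_foldl]
    simp [pvHFilt]
  have hB : parse_config_sections_alt (p ++ (jl :: (m ++ (cl :: q))))
      = (pvHFilt p, pvRFilt m, pvRFilt q) := by
    rw [parse_config_sections_alt]
    rw [bloop_header p _ false [] [] [] hp, bstep_jar _ _ _ _ _ _ hj,
      bloop_jar m (cl :: q) _ _ _ _ hm, bstep_class _ _ _ _ _ _ hc, bloop_class]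
    simp
  rw [hA, hB]

-- ===== VERDICT (by name: the statement is the Claim_ definition above) =====
theorem parse_config_sections_spec : Claim_equal_parse_config_sections := by
  intro lines _ hpre
  obtain ⟨p, m, q, jl, cl, hdec, hp, hj, hm, hc⟩ := parse_decomp lines hpre
  unfold Spec_parse_config_sections
  rw [hdec, main_decomp p m q jl cl hp hj hm hc]
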